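-- pv_equiv track=rewrite | github.com/dkoehler87/xaut_web | pages/xaut_liquidity_monitor.py | extract_last_traceback_frame
-- ===== SOURCE A (Python) =====
-- def extract_last_traceback_frame(tb: str):
--     lines = (tb or "").strip().splitlines()
--     for idx in range(len(lines) - 1, -1, -1):
--         if lines[idx].lstrip().startswith("File "):
--             file_line = lines[idx].strip()
--             code_line = lines[idx + 1].strip() if idx + 1 < len(lines) else ""
--             return file_line, code_line
--     return None, None
-- ===== SOURCE B (Python) =====
-- def extract_last_traceback_frame(tb: str):
--     lines = (tb or "").strip().splitlines()
--     last = None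
--     for i, line in enumerate(lines):
--         if line.lstrip().startswith("File "):
--             last = i
--     if last is None:
--         return None, None
--     file_line = lines[last].strip()
--     code_line = lines[last + 1].strip() if last + 1 < len(lines) else ""
--     return file_line, code_line
-- ===== Notes on version B (the rewrite author's own statement) =====
-- stated objective: alternative
-- what changed: Replaces the reverse index scan with early return by a single forward enumerate pass that records the last matching line index, followed by a separate lookup step.
import Mathlib
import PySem

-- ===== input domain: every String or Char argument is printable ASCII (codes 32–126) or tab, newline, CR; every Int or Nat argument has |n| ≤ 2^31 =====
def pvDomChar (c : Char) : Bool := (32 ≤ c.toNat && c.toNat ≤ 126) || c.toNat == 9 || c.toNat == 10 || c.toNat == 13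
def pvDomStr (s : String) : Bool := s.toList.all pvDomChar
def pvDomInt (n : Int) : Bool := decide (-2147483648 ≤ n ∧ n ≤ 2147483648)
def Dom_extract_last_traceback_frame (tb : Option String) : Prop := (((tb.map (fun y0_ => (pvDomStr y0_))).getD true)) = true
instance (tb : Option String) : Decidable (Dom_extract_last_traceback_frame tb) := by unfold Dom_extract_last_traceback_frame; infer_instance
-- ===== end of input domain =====

-- B replaces A's reverse scan with early return by a forward enumerate pass recording the
-- last matching index, then a separate lookup step (objective: alternative decomposition).

-- ===== PORT A =====
-- the reverse loop 'for idx in range(len(lines)-1, -1, -1)', fuel n = idx+1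
def pvLoopA (lines : List String) : Nat → Option String × Option String
  | 0 => (none, none)
  | n + 1 =>
    if PySem.Str.startswith (PySem.Str.lstrip (PySem.List.pyGetD lines (n : Int) "")) "File " then
      (some (PySem.Str.strip (PySem.List.pyGetD lines (n : Int) "")),
       some (if (n : Int) + 1 < (lines.length : Int) then
               PySem.Str.strip (PySem.List.pyGetD lines ((n : Int) + 1) "")
             else ""))
    else pvLoopA lines n

def extract_last_traceback_frame (tb : Option String) : Option String × Option String :=
  let lines := PySem.Str.splitlines (PySem.Str.strip (tb.getD ""))
  pvLoopA lines lines.length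

-- ===== PORT B =====
def extract_last_traceback_frame_alt (tb : Option String) : Option String × Option String :=
  let lines := PySem.Str.splitlines (PySem.Str.strip (tb.getD ""))
  let last := (PySem.List.enumerate lines).foldl
      (fun acc p => if PySem.Str.startswith (PySem.Str.lstrip p.2) "File " then some p.1 else acc)
      (none : Option Int)
  match last with
  | none => (none, none)
  | some i =>
      (some (PySem.Str.strip (PySem.List.pyGetD lines i "")),
       some (if i + 1 < (lines.length : Int) then
               PySem.Str.strip (PySem.List.pyGetD lines (i + 1) "")
             else ""))

-- ===== PRECONDITION & SPEC =====
def Spec_extract_last_traceback_frame (tb : Option String) (out : Option String × Option String) : Prop := out = extract_last_traceback_frame_alt tb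
instance (tb : Option String) (out : Option String × Option String) : Decidable (Spec_extract_last_traceback_frame tb out) := by unfold Spec_extract_last_traceback_frame; infer_instance

-- ===== CLAIM (what is proved, stated in full; the proofs are below) =====
def Claim_equal_extract_last_traceback_frame : Prop := ∀ (tb : Option String), Dom_extract_last_traceback_frame tb → Spec_extract_last_traceback_frame tb (extract_last_traceback_frame tb)

-- ===== LEMMAS AND PROOFS =====

-- B's forward fold restricted to the first n lines
def pvLastB (lines : List String) (n : Nat) : Option Int :=
  (List.range n).foldl
    (fun (acc : Option Int) (k : Nat) => if PySem.Str.startswith (PySem.Str.lstrip (PySem.List.pyGetD lines (k : Int) "")) "File " then some ((k : Int)) else acc)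
    none

def pvInterp (lines : List String) : Option Int -> Option String × Option String
  | none => (none, none)
  | some i =>
      (some (PySem.Str.strip (PySem.List.pyGetD lines i "")),
       some (if i + 1 < (lines.length : Int) then
               PySem.Str.strip (PySem.List.pyGetD lines (i + 1) "")
             else ""))

theorem pvLastB_succ (lines : List String) (n : Nat) :
    pvLastB lines (n + 1) =
      if PySem.Str.startswith (PySem.Str.lstrip (PySem.List.pyGetD lines (n : Int) "")) "File " then
        some (n : Int)
      else pvLastB lines n := by
  unfold pvLastB
  rw [List.range_succ, List.foldl_append, List.foldl_cons, List.foldl_nil]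

theorem pvLoopA_eq_interp (lines : List String) (n : Nat) :
    pvLoopA lines n = pvInterp lines (pvLastB lines n) := by
  induction n with
  | zero => rfl
  | succ n ih =>
    rw [pvLoopA, pvLastB_succ]
    by_cases h : PySem.Str.startswith (PySem.Str.lstrip (PySem.List.pyGetD lines (n : Int) "")) "File " = true
    · rw [if_pos h, if_pos h]; rfl
    · rw [if_neg h, if_neg h]; exact ih

theorem pvFold_enumerate_eq (lines : List String) :
    (PySem.List.enumerate lines).foldl
      (fun acc p => if PySem.Str.startswith (PySem.Str.lstrip p.2) "File " then some p.1 else acc)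
      (none : Option Int) = pvLastB lines lines.length := by
  rw [PySem.List.enumerate_eq_map_pyRange lines "", List.foldl_map]
  have hlen : PySem.List.len lines = ((lines.length : Nat) : Int) := by simp
  rw [hlen, PySem.List.pyRange_zero_nat, List.foldl_map]
  rfl

theorem pvMain (lines : List String) :
    pvLoopA lines lines.length =
      (match (PySem.List.enumerate lines).foldl
          (fun acc p => if PySem.Str.startswith (PySem.Str.lstrip p.2) "File " then some p.1 else acc)
          (none : Option Int) with
        | none => ((none : Option String), (none : Option String))
        | some i =>
            (some (PySem.Str.strip (PySem.List.pyGetD lines i "")),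
             some (if i + 1 < (lines.length : Int) then
                     PySem.Str.strip (PySem.List.pyGetD lines (i + 1) "")
                   else ""))) := by
  rw [pvFold_enumerate_eq, pvLoopA_eq_interp]
  cases pvLastB lines lines.length <;> rfl

-- ===== VERDICT (by name: the statement is the Claim_ definition above) =====
set_option maxHeartbeats 1000000 in
theorem extract_last_traceback_frame_spec : Claim_equal_extract_last_traceback_frame := by
  intro tb _
  unfold Spec_extract_last_traceback_frame extract_last_traceback_frame extract_last_traceback_frame_alt
  exact pvMain (PySem.Str.splitlines (PySem.Str.strip (tb.getD "")))
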